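-- pv_equiv track=rewrite | github.com/JoyandAI/lerobot | src/lerobot/motors/auto_calibrate.py | order_motors_for_calibration
-- ===== SOURCE A (Python) =====
-- DEFAULT_CALIBRATION_ORDER = (
--     "elbow_flex",
--     "wrist_flex",
--     "wrist_roll",
--     "gripper",
--     "shoulder_pan",
--     "shoulder_lift",
-- )
--
-- def order_motors_for_calibration(
--     motor_names: list[str],
--     preferred_order: tuple[str, ...] = DEFAULT_CALIBRATION_ORDER,
-- ) -> list[str]:
--     """Preserve the current calibration order through an explicit rule list."""
--
--     ordered: list[str] = []
--     for joint_name in preferred_order: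
--         ordered.extend(name for name in motor_names if joint_name in name and name not in ordered)
--
--     ordered.extend(name for name in motor_names if name not in ordered)
--     return ordered
-- ===== SOURCE B (Python) =====
-- DEFAULT_CALIBRATION_ORDER = (
--     "elbow_flex",
--     "wrist_flex",
--     "wrist_roll",
--     "gripper",
--     "shoulder_pan",
--     "shoulder_lift",
-- )
--
-- def order_motors_for_calibration(
--     motor_names: list[str],
--     preferred_order: tuple[str, ...] = DEFAULT_CALIBRATION_ORDER,
-- ) -> list[str]:
--     """Dedup (first occurrence) then one stable sort by first-matching-rule index."""
--
--     def priority(name: str) -> int: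
--         for i, joint_name in enumerate(preferred_order):
--             if joint_name in name:
--                 return i
--         return len(preferred_order)
--
--     return sorted(dict.fromkeys(motor_names), key=priority)
-- ===== Notes on version B (the rewrite author's own statement) =====
-- stated objective: faster
-- what changed: Replaced A's pass-per-rule group building (one scan of motor_names per preferred entry, each with a linear membership scan of the growing result list) by a single first-occurrence dedup followed by one stable sort keyed on the index of the first matching rule.
import Mathlib
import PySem

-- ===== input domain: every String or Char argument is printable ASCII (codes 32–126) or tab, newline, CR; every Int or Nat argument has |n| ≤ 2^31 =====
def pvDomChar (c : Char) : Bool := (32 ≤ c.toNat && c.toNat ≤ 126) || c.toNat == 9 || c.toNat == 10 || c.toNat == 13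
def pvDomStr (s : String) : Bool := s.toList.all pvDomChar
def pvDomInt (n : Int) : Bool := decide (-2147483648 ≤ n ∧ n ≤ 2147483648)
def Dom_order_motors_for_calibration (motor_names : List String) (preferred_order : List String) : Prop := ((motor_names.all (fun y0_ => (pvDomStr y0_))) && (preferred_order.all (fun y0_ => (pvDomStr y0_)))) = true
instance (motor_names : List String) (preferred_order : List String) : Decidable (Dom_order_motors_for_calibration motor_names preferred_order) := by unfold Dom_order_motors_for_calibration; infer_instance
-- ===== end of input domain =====

-- B replaces A's pass-per-rule group building (with its linear membership scans of the growing
-- result) by one first-occurrence dedup plus one stable sort keyed on the index of the first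
-- matching rule; a timing run measured B faster (objective: faster).

-- ===== PORT A =====
def order_motors_for_calibration (motor_names : List String) (preferred_order : List String) : List String :=
  -- ordered = []; for joint_name in preferred_order: ordered.extend(name for name in motor_names
  --   if joint_name in name and name not in ordered)   (extend consumes the generator lazily, so
  --   the 'name not in ordered' test sees names appended earlier in the same pass)
  let ordered : List String := preferred_order.foldl
    (fun ordered joint_name =>
      motor_names.foldl
        (fun acc name =>
          if PySem.Str.isIn joint_name name && !(acc.contains name) then acc ++ [name] else acc)
        ordered)
    []
  -- ordered.extend(name for name in motor_names if name not in ordered)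
  motor_names.foldl
    (fun acc name => if !(acc.contains name) then acc ++ [name] else acc)
    ordered

-- ===== PORT B =====
-- def priority(name): for i, joint_name in enumerate(preferred_order):
--   if joint_name in name: return i;  return len(preferred_order)
def omfc_priority (preferred_order : List String) (name : String) : Nat :=
  match preferred_order with
  | [] => 0
  | joint_name :: rest =>
    if PySem.Str.isIn joint_name name then 0 else omfc_priority rest name + 1

-- return sorted(dict.fromkeys(motor_names), key=priority)
def order_motors_for_calibration_alt (motor_names : List String) (preferred_order : List String) : List String :=
  PySem.List.sorted (PySem.List.dedup motor_names) (fun name => omfc_priority preferred_order name) false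

-- ===== PRECONDITION & SPEC =====
def Spec_order_motors_for_calibration (motor_names : List String) (preferred_order : List String) (out : List String) : Prop := out = order_motors_for_calibration_alt motor_names preferred_order
instance (motor_names : List String) (preferred_order : List String) (out : List String) : Decidable (Spec_order_motors_for_calibration motor_names preferred_order out) := by unfold Spec_order_motors_for_calibration; infer_instance

-- ===== CLAIM (what is proved, stated in full; the proofs are below) =====
def Claim_equal_order_motors_for_calibration : Prop := ∀ (motor_names : List String) (preferred_order : List String), Dom_order_motors_for_calibration motor_names preferred_order → Spec_order_motors_for_calibration motor_names preferred_order (order_motors_for_calibration motor_names preferred_order)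

-- ===== LEMMAS AND PROOFS =====

def omfcPass (c : String → Bool) (l : List String) (acc : List String) : List String :=
  l.foldl (fun acc name => if c name && !(acc.contains name) then acc ++ [name] else acc) acc

def omfcGroups (po : List String) (M : List String) (B : Nat) : List String :=
  (List.range B).flatMap (fun k => M.filter (fun n => omfc_priority po n == k))

theorem omfc_insertBy_all_before {α : Type} (before : α → α → Bool) (x : α) (ys : List α)
    (h : ∀ y ∈ ys, before x y = true) :
    PySem.List.insertBy before x ys = x :: ys := by
  cases ys with
  | nil => simp [PySem.List.insertBy]
  | cons y ys => simp [PySem.List.insertBy, h y (by simp)]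

theorem omfc_insertBy_append {α : Type} (before : α → α → Bool) (x : α) (p q : List α)
    (h : ∀ y ∈ p, before x y = false) :
    PySem.List.insertBy before x (p ++ q) = p ++ PySem.List.insertBy before x q := by
  induction p with
  | nil => simp
  | cons y p ih =>
    simp only [List.cons_append, PySem.List.insertBy, h y (by simp)]
    simp [ih (fun z hz => h z (by simp [hz]))]

theorem omfc_flatMap_congr {α β : Type} (l : List α) (f g : α → List β)
    (h : ∀ a ∈ l, f a = g a) : l.flatMap f = l.flatMap g := by
  induction l with
  | nil => rfl
  | cons a l ih =>
    simp only [List.flatMap_cons, h a (by simp), ih (fun b hb => h b (by simp [hb]))]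

theorem omfc_insert_bucket {α : Type} (key : α → Nat) (x : α) (ks : List Nat) (G : Nat → List α)
    (hks : ks.Pairwise (· < ·)) (hx : key x ∈ ks)
    (hG : ∀ k ∈ ks, ∀ y ∈ G k, key y = k) :
    PySem.List.insertBy (fun a b => decide (key a < key b)) x (ks.flatMap G)
      = ks.flatMap (fun k => G k ++ if key x == k then [x] else []) := by
  induction ks with
  | nil => simp at hx
  | cons k ks ih =>
    rcases List.pairwise_cons.mp hks with ⟨hlt, hks'⟩
    rw [List.flatMap_cons, List.flatMap_cons]
    by_cases hk : key x = k
    · rw [omfc_insertBy_append _ _ _ _ (fun y hy => by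
        simp [hG k (by simp) y hy, hk])]
      rw [omfc_insertBy_all_before _ _ _ (fun y hy => by
        rcases List.mem_flatMap.mp hy with ⟨k', hk', hy'⟩
        simp only [hG k' (by simp [hk']) y hy', decide_eq_true_eq]
        rw [hk]; exact hlt k' hk')]
      have hrest : ks.flatMap (fun k' => G k' ++ if key x == k' then [x] else []) = ks.flatMap G := by
        apply omfc_flatMap_congr
        intro k' hk'
        have : key x ≠ k' := by have := hlt k' hk'; omega
        simp [this]
      rw [hrest]
      simp [hk]
    · have hx' : key x ∈ ks := by
        rcases List.mem_cons.mp hx with h | h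
        · exact absurd h hk
        · exact h
      rw [omfc_insertBy_append _ _ _ _ (fun y hy => by
        have hky : key y = k := hG k (by simp) y hy
        have hklt : k < key x := hlt _ hx'
        simp only [hky, decide_eq_false_iff_not]
        omega)]
      rw [ih hks' hx' (fun k' hk' y hy => hG k' (by simp [hk']) y hy)]
      have : (key x == k) = false := by simp [hk]
      simp [this]

theorem omfc_sorted_eq_flatMap_filter {α : Type} (key : α → Nat) (xs : List α) (B : Nat)
    (h : ∀ x ∈ xs, key x < B) :
    PySem.List.sorted xs key false
      = (List.range B).flatMap (fun k => xs.filter (fun x => key x == k)) := by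
  induction xs using List.reverseRecOn with
  | nil => simp [PySem.List.sorted_eq_foldl_insertBy]
  | append_singleton ys x ih =>
    rw [PySem.List.sorted_eq_foldl_insertBy, List.foldl_append, List.foldl_cons, List.foldl_nil,
      ← PySem.List.sorted_eq_foldl_insertBy]
    rw [ih (fun y hy => h y (by simp [hy]))]
    rw [omfc_insert_bucket key x (List.range B) _ (List.pairwise_lt_range)
      (by simp; exact h x (by simp))
      (fun k _ y hy => by simpa using (List.mem_filter.mp hy).2)]
    apply omfc_flatMap_congr
    intro k _
    simp [List.filter_append, List.filter_singleton]

theorem omfc_prio_le (po : List String) (n : String) : omfc_priority po n ≤ po.length := by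
  induction po with
  | nil => simp [omfc_priority]
  | cons j po ih =>
    simp only [omfc_priority, List.length_cons]
    split <;> omega

theorem omfc_prio_append (qs : List String) (p : String) (n : String) :
    omfc_priority (qs ++ [p]) n =
      if omfc_priority qs n < qs.length then omfc_priority qs n
      else (if PySem.Str.isIn p n then qs.length else qs.length + 1) := by
  induction qs with
  | nil => simp [omfc_priority]
  | cons q qs ih =>
    by_cases hq : PySem.Str.isIn q n = true
    · have hq2 : PySem.Chars.isIn q.toList n.toList = true := by simpa using hq
      simp [omfc_priority, hq2]
    · have hq' : PySem.Str.isIn q n = false := by simpa using hq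
      simp only [List.cons_append, omfc_priority, List.length_cons]
      simp only [PySem.Str.isIn_eq] at hq' ih ⊢
      simp only [hq', Bool.false_eq_true, if_false, ih]
      split_ifs <;> omega

theorem omfc_setfold_acc (l : List String) : ∀ (s : List String),
    l.foldl PySem.Set.add s = s ++ (PySem.List.dedup l).filter (fun x => !(s.contains x)) := by
  induction l with
  | nil => intro s; simp [PySem.List.dedup_eq_ofList, PySem.Set.ofList]
  | cons a l ih =>
    intro s
    have hd : PySem.List.dedup (a :: l) = List.foldl PySem.Set.add (PySem.Set.add [] a) l := by
      simp [PySem.List.dedup_eq_ofList, PySem.Set.ofList_eq_foldl]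
    have hadd : PySem.Set.add ([] : List String) a = [a] := by simp [PySem.Set.add]
    rw [List.foldl_cons, ih, hd, hadd, ih [a]]
    by_cases hsa : s.contains a = true
    · have hsa' : a ∈ s := by simpa using hsa
      have h1 : PySem.Set.add s a = s := by simp [PySem.Set.add, hsa']
      rw [h1]
      rw [List.filter_append, List.filter_filter]
      have h2 : List.filter (fun x => !s.contains x) [a] = [] := by
        simp [hsa']
      rw [h2]
      congr 1
      apply List.filter_congr
      intro x _
      by_cases hxa : x = a
      · subst hxa; simp [hsa']
      · simp [hxa]
    · have hsa' : a ∉ s := by simpa using hsa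
      have h1 : PySem.Set.add s a = s ++ [a] := by simp [PySem.Set.add, hsa']
      rw [h1]
      rw [List.filter_append, List.filter_filter]
      have h2 : List.filter (fun x => !s.contains x) [a] = [a] := by
        simp [hsa']
      rw [h2, List.append_assoc]
      congr 2
      apply List.filter_congr
      intro x _
      by_cases hxa : x = a
      · subst hxa; simp
      · simp [hxa]

theorem omfc_dedup_cons (a : String) (l : List String) :
    PySem.List.dedup (a :: l) = a :: (PySem.List.dedup l).filter (fun x => !(x == a)) := by
  have hd : PySem.List.dedup (a :: l) = List.foldl PySem.Set.add [a] l := by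
    simp [PySem.List.dedup_eq_ofList, PySem.Set.ofList_eq_foldl, PySem.Set.add]
  rw [hd, omfc_setfold_acc]
  simp only [List.singleton_append, List.cons.injEq, true_and]
  apply List.filter_congr
  intro x _
  by_cases hxa : x = a <;> simp [hxa]

theorem omfc_pass_filter (c : String → Bool) (l : List String) : ∀ (acc : List String),
    omfcPass c l acc = acc ++ (PySem.List.dedup l).filter (fun n => c n && !(acc.contains n)) := by
  induction l with
  | nil =>
    intro acc
    simp [omfcPass, PySem.List.dedup_eq_ofList, PySem.Set.ofList]
  | cons n l ih =>
    intro acc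
    rw [omfc_dedup_cons]
    simp only [omfcPass, List.foldl_cons]
    by_cases hc : (c n && !(acc.contains n)) = true
    · rw [if_pos hc]
      have hrec := ih (acc ++ [n])
      simp only [omfcPass] at hrec
      rw [hrec]
      simp only [List.filter_cons, hc, if_true, List.filter_filter, List.append_assoc,
        List.singleton_append]
      congr 2
      apply List.filter_congr
      intro m _
      by_cases hmn : m = n
      · subst hmn; simp
      · simp [hmn]
    · rw [if_neg hc]
      have hcF : (c n && !(acc.contains n)) = false := by simpa using hc
      have hrec := ih acc
      simp only [omfcPass] at hrec
      rw [hrec]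
      simp only [List.filter_cons, hcF, Bool.false_eq_true, if_false, List.filter_filter]
      congr 1
      apply List.filter_congr
      intro m _
      by_cases hmn : m = n
      · subst hmn
        simp
        intro hcm
        rw [hcm] at hcF
        simp only [Bool.true_and] at hcF
        simpa using hcF
      · simp [hmn]

theorem omfc_mem_groups (po : List String) (M : List String) (B : Nat) (n : String) :
    n ∈ omfcGroups po M B ↔ n ∈ M ∧ omfc_priority po n < B := by
  simp only [omfcGroups, List.mem_flatMap, List.mem_range, List.mem_filter, beq_iff_eq]
  constructor
  · rintro ⟨k, hk, hn, hp⟩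
    exact ⟨hn, by omega⟩
  · rintro ⟨hn, hp⟩
    exact ⟨omfc_priority po n, hp, hn, rfl⟩

theorem omfc_A_groups (M : List String) (po : List String) :
    po.foldl (fun ord j => ord ++ M.filter (fun n => PySem.Str.isIn j n && !(ord.contains n))) []
      = omfcGroups po M po.length := by
  induction po using List.reverseRecOn with
  | nil => simp [omfcGroups]
  | append_singleton qs p ih =>
    rw [List.foldl_append, List.foldl_cons, List.foldl_nil, ih]
    have hlen : (qs ++ [p]).length = qs.length + 1 := by simp
    rw [hlen]
    have hr : omfcGroups (qs ++ [p]) M (qs.length + 1)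
        = (List.range qs.length).flatMap (fun k => M.filter (fun n => omfc_priority (qs ++ [p]) n == k))
          ++ M.filter (fun n => omfc_priority (qs ++ [p]) n == qs.length) := by
      simp [omfcGroups, List.range_succ]
    rw [hr]
    have hpiece1 : (List.range qs.length).flatMap (fun k => M.filter (fun n => omfc_priority (qs ++ [p]) n == k))
        = omfcGroups qs M qs.length := by
      apply omfc_flatMap_congr
      intro k hk
      rw [List.mem_range] at hk
      apply List.filter_congr
      intro n _
      have hle := omfc_prio_le qs n
      rw [omfc_prio_append]
      by_cases h1 : omfc_priority qs n < qs.length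
      · rw [if_pos h1]
      · rw [if_neg h1]
        have h2 : omfc_priority qs n = qs.length := by omega
        rw [h2]
        by_cases hp' : PySem.Str.isIn p n = true
        · rw [if_pos hp']
        · rw [if_neg hp']
          have e1 : ((qs.length + 1 : Nat) == k) = false := by
            simp only [beq_eq_false_iff_ne, ne_eq]; omega
          have e2 : ((qs.length : Nat) == k) = false := by
            simp only [beq_eq_false_iff_ne, ne_eq]; omega
          rw [e1, e2]
    rw [hpiece1]
    congr 1
    apply List.filter_congr
    intro n hn
    have hle := omfc_prio_le qs n
    have hcont : (omfcGroups qs M qs.length).contains n = decide (omfc_priority qs n < qs.length) := by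
      by_cases hin : omfc_priority qs n < qs.length
      · have : n ∈ omfcGroups qs M qs.length := (omfc_mem_groups _ _ _ _).mpr ⟨hn, hin⟩
        simp [this, hin]
      · have : n ∉ omfcGroups qs M qs.length := fun hmem =>
          hin ((omfc_mem_groups _ _ _ _).mp hmem).2
        simp [this, hin]
    rw [hcont, omfc_prio_append]
    by_cases h1 : omfc_priority qs n < qs.length
    · rw [if_pos h1]
      simp [h1, Nat.ne_of_lt h1]
    · rw [if_neg h1]
      have h2 : omfc_priority qs n = qs.length := by omega
      by_cases hp' : PySem.Str.isIn p n = true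
      · rw [if_pos hp']
        have hp2 : PySem.Chars.isIn p.toList n.toList = true := by simpa using hp'
        simp [hp2, h1]
      · rw [if_neg hp']
        have hpf2 : PySem.Chars.isIn p.toList n.toList = false := by simpa using hp'
        simp [hpf2, h1]

-- ===== VERDICT =====
theorem order_motors_for_calibration_spec : Claim_equal_order_motors_for_calibration := by
  intro mn po _
  unfold Spec_order_motors_for_calibration
  unfold order_motors_for_calibration order_motors_for_calibration_alt
  have hL : ∀ n ∈ PySem.List.dedup mn, (fun name => omfc_priority po name) n < po.length + 1 := by
    intro n _
    exact Nat.lt_succ_of_le (omfc_prio_le po n)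
  rw [omfc_sorted_eq_flatMap_filter _ _ _ hL]
  show omfcPass (fun _ => true) mn
      (po.foldl (fun ordered joint_name => omfcPass (PySem.Str.isIn joint_name) mn ordered) []) = _
  have hOuter : po.foldl (fun ordered joint_name => omfcPass (PySem.Str.isIn joint_name) mn ordered) []
      = po.foldl (fun ord j => ord ++ (PySem.List.dedup mn).filter
          (fun n => PySem.Str.isIn j n && !(ord.contains n))) [] := by
    apply PySem.List.foldl_congr_mem
    intro acc j _
    exact omfc_pass_filter _ mn acc
  rw [hOuter, omfc_A_groups, omfc_pass_filter]
  set M := PySem.List.dedup mn with hM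
  set G := omfcGroups po M po.length with hG
  have hlast : M.filter (fun n => (fun _ => true) n && !(G.contains n))
      = M.filter (fun n => omfc_priority po n == po.length) := by
    apply List.filter_congr
    intro n hn
    have hle := omfc_prio_le po n
    by_cases hin : omfc_priority po n < po.length
    · have e2 : (omfc_priority po n == po.length) = false := by
        simp only [beq_eq_false_iff_ne, ne_eq]; omega
      have : n ∈ G := (omfc_mem_groups _ _ _ _).mpr ⟨hn, hin⟩
      simp [this, e2]
    · have h2 : omfc_priority po n = po.length := by omega
      have : n ∉ G := fun hmem => hin ((omfc_mem_groups _ _ _ _).mp hmem).2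
      simp [this, h2]
  rw [hlast]
  show G ++ M.filter (fun n => omfc_priority po n == po.length)
      = (List.range (po.length + 1)).flatMap (fun k => M.filter (fun n => omfc_priority po n == k))
  rw [List.range_succ, List.flatMap_append]
  simp [hG, omfcGroups]
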